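-- pv_equiv track=rewrite | github.com/ViraKrajevskiy/Python-tasks | 18/124.py | array_124
-- ===== SOURCE A (Python) =====
-- def array_124(array, K):
--     result = []
--     current_series = []
--     previous_value = None
--
--     for element in array:
--         if element == previous_value:
--             current_series.append(element)
--         else:
--             if current_series and len(current_series) > K:
--                 result.append(K)
--             else:
--                 result.extend(current_series)
--             current_series = [element]
--         previous_value = element
--
--     if current_series and len(current_series) > K:
--         result.append(K)
--     else:
--         result.extend(current_series)
--
--     return result
-- ===== SOURCE B (Python) =====
-- def array_124(array, K):
--     # Pass 1 (right to left): rem[i] = length of the maximal run of array[i]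
--     # starting at i (run length seen from i to the run's right end).
--     n = len(array)
--     rem = [0] * n
--     for i in range(n - 1, -1, -1):
--         if i + 1 < n and array[i + 1] == array[i]:
--             rem[i] = rem[i + 1] + 1
--         else:
--             rem[i] = 1
--     # Pass 2: jump from run start to run start, emitting K or the slice.
--     out = []
--     i = 0
--     while i < n:
--         L = rem[i]
--         if L > K:
--             out.append(K)
--         else:
--             out.extend(array[i:i + L])
--         i += L
--     return out
-- ===== Notes on version B (the rewrite author's own statement) =====
-- stated objective: alternative
-- what changed: Replaces A's single pass with previous_value/current_series pending-run accumulators and a duplicated post-loop flush by two staged passes: a right-to-left pass tabulating the run length starting at each index, then a skip loop that jumps from run start to run start emitting K or the slice array[i:i+L].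
import Mathlib
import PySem

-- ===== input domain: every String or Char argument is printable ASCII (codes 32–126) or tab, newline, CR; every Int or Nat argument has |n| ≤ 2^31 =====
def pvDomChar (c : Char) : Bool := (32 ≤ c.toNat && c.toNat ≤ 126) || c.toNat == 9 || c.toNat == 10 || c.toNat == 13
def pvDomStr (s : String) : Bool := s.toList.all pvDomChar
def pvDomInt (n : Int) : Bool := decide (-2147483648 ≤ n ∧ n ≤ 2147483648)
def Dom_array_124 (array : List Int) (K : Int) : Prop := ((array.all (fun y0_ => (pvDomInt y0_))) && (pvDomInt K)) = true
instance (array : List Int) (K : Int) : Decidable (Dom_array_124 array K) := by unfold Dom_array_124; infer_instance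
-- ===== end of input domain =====

-- B replaces A's single pass with pending-run accumulators by two staged passes:
-- a right-to-left run-length table, then a skip loop over run starts (objective: alternative).

-- ===== PORT A =====
-- loop body of A: state = (result, current_series, previous_value)
def stepA (K : Int) (st : List Int × List Int × Option Int) (e : Int) :
    List Int × List Int × Option Int :=
  if some e = st.2.2 then (st.1, st.2.1 ++ [e], some e)
  else
    ((if st.2.1 ≠ [] ∧ (st.2.1.length : Int) > K then st.1 ++ [K] else st.1 ++ st.2.1),
     [e], some e)

def array_124 (array : List Int) (K : Int) : List Int :=
  let st := array.foldl (stepA K) ([], [], none)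
  if st.2.1 ≠ [] ∧ (st.2.1.length : Int) > K then st.1 ++ [K] else st.1 ++ st.2.1

-- ===== PORT B =====
-- Pass 1 of Source B: rem[i] = rem[i+1] + 1 if array[i+1] == array[i] else 1, built
-- right to left; as a list it is built by structural recursion on the tail.
def remList : List Int → List Nat
  | [] => []
  | x :: xs =>
    let r := remList xs
    (match xs with
     | y :: _ => if y = x then r.headD 0 + 1 else 1
     | [] => 1) :: r

-- Pass 2 of Source B: while i < n: L = rem[i]; emit K or array[i:i+L]; i += L.
-- The index i is represented by the suffixes of array and rem from position i;
-- 'i += L' drops L entries from each (head of rem plus L-1 of its tail).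
-- (rem entries produced by pass 1 are ≥ 1, so this is exactly Python's loop.)
def emitLoop (K : Int) (arr : List Int) (rem : List Nat) : List Int :=
  match rem with
  | [] => []
  | L :: rem' =>
    (if (L : Int) > K then [K] else arr.take L) ++
      emitLoop K (arr.drop L) (rem'.drop (L - 1))
termination_by rem.length
decreasing_by
  simp only [List.length_drop, List.length_cons]; omega

def array_124_alt (array : List Int) (K : Int) : List Int :=
  emitLoop K array (remList array)

-- ===== PRECONDITION & SPEC =====
def Spec_array_124 (array : List Int) (K : Int) (out : List Int) : Prop := out = array_124_alt array K
instance (array : List Int) (K : Int) (out : List Int) : Decidable (Spec_array_124 array K out) := by unfold Spec_array_124; infer_instance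

-- ===== CLAIM =====
def Claim_equal_array_124 : Prop := ∀ (array : List Int) (K : Int), Dom_array_124 array K → Spec_array_124 array K (array_124 array K)

-- ===== LEMMAS AND PROOFS =====

-- the common reference: maximal runs of consecutive equal elements
def runs124 (l : List Int) : List (List Int) :=
  match l with
  | [] => []
  | x :: xs => (x :: xs.takeWhile (· = x)) :: runs124 (xs.dropWhile (· = x))
termination_by l.length
decreasing_by
  simpa using Nat.lt_succ_of_le (List.length_dropWhile_le _ _)

def emit124 (K : Int) (run : List Int) : List Int :=
  if (run.length : Int) > K then [K] else run

-- ----- A-side: the fold equals flatMap emit124 over the runs -----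

lemma takeWhile_replicate_append {p e : Int} (h : e ≠ p) (n : Nat) (l : List Int) :
    ((List.replicate n p ++ e :: l).takeWhile (· = p)) = List.replicate n p := by
  induction n with
  | zero => simp [h]
  | succ n ih => simp [List.replicate_succ, ih]

lemma dropWhile_replicate_append {p e : Int} (h : e ≠ p) (n : Nat) (l : List Int) :
    ((List.replicate n p ++ e :: l).dropWhile (· = p)) = e :: l := by
  induction n with
  | zero => simp [h]
  | succ n ih => simp [List.replicate_succ, ih]

lemma runs124_replicate_append {p e : Int} (h : e ≠ p) (n : Nat) (l : List Int) :
    runs124 (List.replicate (n + 1) p ++ e :: l)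
      = List.replicate (n + 1) p :: runs124 (e :: l) := by
  rw [List.replicate_succ, List.cons_append, runs124,
    takeWhile_replicate_append h, dropWhile_replicate_append h]

lemma runs124_replicate (p : Int) (n : Nat) :
    runs124 (List.replicate (n + 1) p) = [List.replicate (n + 1) p] := by
  rw [List.replicate_succ, runs124]
  simp [runs124]

-- the loop invariant: from a state holding pending run  replicate (n+1) p, result r
lemma main124 (K : Int) : ∀ (arr : List Int) (r : List Int) (n : Nat) (p : Int),
    (let st := arr.foldl (stepA K) (r, List.replicate (n + 1) p, some p)
     if st.2.1 ≠ [] ∧ (st.2.1.length : Int) > K then st.1 ++ [K] else st.1 ++ st.2.1)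
      = r ++ (runs124 (List.replicate (n + 1) p ++ arr)).flatMap (emit124 K) := by
  intro arr
  induction arr with
  | nil =>
    intro r n p
    simp only [List.foldl_nil, runs124_replicate, List.flatMap_cons, List.flatMap_nil,
      List.append_nil, emit124]
    split_ifs with h1 h2 h3
    · rfl
    · simp at h1 h2; omega
    · exfalso; apply h1; constructor
      · simp
      · simpa using h3
    · rfl
  | cons e arr ih =>
    intro r n p
    by_cases he : e = p
    · subst he
      have hst : stepA K (r, List.replicate (n + 1) e, some e) e
          = (r, List.replicate (n + 2) e, some e) := by
        simp [stepA, List.replicate_succ' (n := n + 1)]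
      rw [List.foldl_cons, hst]
      have harr : List.replicate (n + 1) e ++ e :: arr = List.replicate (n + 2) e ++ arr := by
        rw [List.replicate_succ' (n := n + 1)]; simp
      rw [harr]
      exact ih r (n + 1) e
    · have hst : stepA K (r, List.replicate (n + 1) p, some p) e
          = (r ++ emit124 K (List.replicate (n + 1) p), [e], some e) := by
        simp only [stepA, emit124]
        rw [if_neg (by simp [he])]
        split_ifs with h1 h2 h3
        · rfl
        · simp at h1 h2; omega
        · exfalso; apply h1; constructor
          · simp
          · simpa using h3
        · rfl
      rw [List.foldl_cons, hst]
      have hih := ih (r ++ emit124 K (List.replicate (n + 1) p)) 0 e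
      simp only [show (0:Nat) + 1 = 1 from rfl, List.replicate_one, List.singleton_append] at hih
      rw [runs124_replicate_append he]
      simpa [List.append_assoc] using hih

lemma array_124_eq_flatMap (array : List Int) (K : Int) :
    array_124 array K = (runs124 array).flatMap (emit124 K) := by
  cases array with
  | nil => simp [array_124, runs124]
  | cons x xs =>
    unfold array_124
    have hst : stepA K ([], [], none) x = ([], [x], some x) := by
      simp [stepA]
    rw [List.foldl_cons, hst]
    have hih := main124 K xs [] 0 x
    simp only [show (0:Nat) + 1 = 1 from rfl, List.replicate_one, List.singleton_append,
      List.nil_append] at hih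
    simpa using hih

-- ----- B-side: the two passes also equal flatMap emit124 over the runs -----

lemma remList_nil : remList [] = [] := rfl

lemma remList_single (x : Int) : remList [x] = [1] := rfl

lemma remList_cons_cons (x y : Int) (ys : List Int) :
    remList (x :: y :: ys)
      = (if y = x then (remList (y :: ys)).head?.getD 0 + 1 else 1) :: remList (y :: ys) := rfl

lemma remList_head : ∀ (xs : List Int) (x : Int),
    (remList (x :: xs)).head?.getD 0 = (xs.takeWhile (· = x)).length + 1 := by
  intro xs
  induction xs with
  | nil => intro x; rw [remList_single]; simp
  | cons y ys ih =>
    intro x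
    rw [remList_cons_cons]
    simp only [List.head?_cons, Option.getD_some]
    by_cases hy : y = x
    · subst hy
      rw [if_pos rfl, ih y]
      simp [List.takeWhile]
    · rw [if_neg hy]
      simp [List.takeWhile, hy]

lemma remList_cons (xs : List Int) (x : Int) :
    remList (x :: xs) = ((xs.takeWhile (· = x)).length + 1) :: remList xs := by
  cases xs with
  | nil => rw [remList_single]; simp [remList_nil]
  | cons y ys =>
    rw [remList_cons_cons]
    by_cases hy : y = x
    · subst hy
      rw [if_pos rfl, remList_head]
      simp [List.takeWhile]
    · rw [if_neg hy]
      simp [List.takeWhile, hy]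

lemma drop_takeWhile (l : List Int) (p : Int → Bool) :
    l.drop (l.takeWhile p).length = l.dropWhile p := by
  induction l with
  | nil => rfl
  | cons x xs ih =>
    by_cases h : p x
    · simp [List.takeWhile, List.dropWhile, h, ih]
    · simp [List.takeWhile, List.dropWhile, h]

lemma take_takeWhile (l : List Int) (p : Int → Bool) :
    l.take (l.takeWhile p).length = l.takeWhile p := by
  induction l with
  | nil => rfl
  | cons x xs ih =>
    by_cases h : p x
    · simp [List.takeWhile, h, ih]
    · simp [List.takeWhile, h]

lemma remList_drop : ∀ (l : List Int) (k : Nat), (remList l).drop k = remList (l.drop k) := by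
  intro l
  induction l with
  | nil => intro k; simp [remList]
  | cons x xs ih =>
    intro k
    cases k with
    | zero => rfl
    | succ k =>
      rw [remList_cons]
      simpa using ih k

lemma emitLoop_eq_flatMap (K : Int) : ∀ (arr : List Int),
    emitLoop K arr (remList arr) = (runs124 arr).flatMap (emit124 K) := by
  intro arr
  induction arr using runs124.induct with
  | case1 => simp [remList, emitLoop, runs124]
  | case2 x xs ih =>
    rw [remList_cons, runs124, emitLoop]
    have hL : ((xs.takeWhile (· = x)).length + 1 : Int) = ((x :: xs.takeWhile (· = x)).length : Int) := by
      simp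
    have hdroparr : (x :: xs).drop ((xs.takeWhile (· = x)).length + 1)
        = xs.dropWhile (· = x) := by
      simpa using drop_takeWhile xs (· = x)
    have hdroprem : (remList xs).drop ((xs.takeWhile (· = x)).length + 1 - 1)
        = remList (xs.dropWhile (· = x)) := by
      rw [Nat.add_sub_cancel, remList_drop, drop_takeWhile]
    have htake : (x :: xs).take ((xs.takeWhile (· = x)).length + 1)
        = x :: xs.takeWhile (· = x) := by
      simpa using take_takeWhile xs (· = x)
    rw [hdroparr, hdroprem, ih, htake, List.flatMap_cons]
    unfold emit124
    push_cast
    simp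

lemma array_124_eq (array : List Int) (K : Int) :
    array_124 array K = array_124_alt array K := by
  rw [array_124_eq_flatMap, array_124_alt, emitLoop_eq_flatMap]

-- ===== VERDICT =====
theorem array_124_spec : Claim_equal_array_124 := by
  intro array K _
  exact array_124_eq array K
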